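-- pv_equiv track=rewrite | github.com/PoliteStorm/AVALON | fungal_rosetta_stone.py | _build_transition_graph
-- ===== SOURCE A (Python) =====
-- from typing import Dict, List, Tuple
--
-- def _build_transition_graph(words: List[List[int]]) -> Dict[int, List[int]]:
--     """
--     Build state transition graph from word sequences as per Adamatzky (2022).
--
--     From Section 2(e) of the paper:
--     - Each unique word length is a state
--     - Transitions occur between consecutive words
--     - Graph reveals patterns in word length changes
--
--     Parameters
--     ----------
--     words : List[List[int]]
--         List of words, where each word is a list of spikes
--
--     Returns
--     -------
--     Dict[int, List[int]]
--         Dictionary mapping each state (word length) to its possible next states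
--     """
--     if not words:
--         return {}
--
--     # Convert words to lengths
--     lengths = [len(word) for word in words]
--
--     # Build transition graph
--     transitions = {}
--
--     # Initialize transitions dictionary with empty lists for all observed lengths
--     unique_lengths = set(lengths)
--     for length in unique_lengths:
--         transitions[length] = []
--
--     # Add transitions between consecutive words
--     for i in range(len(lengths) - 1):
--         current_length = lengths[i]
--         next_length = lengths[i + 1]
--         transitions[current_length].append(next_length)
--
--     # Sort transition lists for consistency
--     for state in transitions:
--         transitions[state] = sorted(transitions[state])
--
--     return transitions
-- ===== SOURCE B (Python) =====
-- from typing import Dict, List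
--
-- def _build_transition_graph(words: List[List[int]]) -> Dict[int, List[int]]:
--     """Group-by-first over one globally sorted pair list: sorting (current, next)
--     pairs once lexicographically makes every bucket come out sorted, so no
--     per-state sort pass is needed."""
--     if not words:
--         return {}
--     lengths = [len(word) for word in words]
--     transitions = {length: [] for length in set(lengths)}
--     for current, nxt in sorted(zip(lengths, lengths[1:])):
--         transitions[current].append(nxt)
--     return transitions
-- ===== Notes on version B (the rewrite author's own statement) =====
-- stated objective: alternative
-- what changed: Replaces A's index loop over range(len-1) plus a per-state sort of every bucket with one global lexicographic sort of the (current, next) pair list from zip(lengths, lengths[1:]) followed by a single grouping pass that appends into pre-initialized buckets, which are then already sorted.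
import Mathlib
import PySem

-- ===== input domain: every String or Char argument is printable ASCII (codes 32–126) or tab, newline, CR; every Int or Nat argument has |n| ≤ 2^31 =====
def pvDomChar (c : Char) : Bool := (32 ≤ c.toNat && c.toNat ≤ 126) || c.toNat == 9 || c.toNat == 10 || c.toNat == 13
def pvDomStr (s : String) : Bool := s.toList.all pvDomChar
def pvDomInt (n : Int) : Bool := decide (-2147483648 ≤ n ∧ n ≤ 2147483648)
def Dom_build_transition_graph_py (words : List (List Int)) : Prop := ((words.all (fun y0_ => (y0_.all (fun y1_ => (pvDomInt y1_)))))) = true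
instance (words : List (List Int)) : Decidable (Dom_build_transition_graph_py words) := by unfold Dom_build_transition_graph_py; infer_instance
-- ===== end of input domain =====

-- B replaces A's index loop over range(len-1) plus a per-state sort of every bucket with one
-- global lexicographic sort of the (current, next) pairs followed by a single grouping pass
-- (objective: alternative).

-- ===== PORT A =====
def build_transition_graph_py (words : List (List Int)) : List (Int × List Int) :=
  if words = [] then [] else
  -- lengths = [len(word) for word in words]
  let lengths : List Int := words.map (fun w => (w.length : Int))
  -- transitions = {}; for length in set(lengths): transitions[length] = []
  let transitions : PySem.Dict Int (List Int) :=
    (PySem.Set.ofList lengths).foldl (fun d l => d.insert l []) PySem.Dict.empty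
  -- for i in range(len(lengths) - 1): transitions[lengths[i]].append(lengths[i+1])
  let transitions :=
    (PySem.List.pyRange 0 ((lengths.length : Int) - 1) 1).foldl
      (fun d i => d.modify (PySem.List.pyGetD lengths i 0) []
        (fun v => v ++ [PySem.List.pyGetD lengths (i + 1) 0])) transitions
  -- for state in transitions: transitions[state] = sorted(transitions[state])
  let transitions :=
    transitions.keys.foldl
      (fun d s => d.insert s (PySem.List.sorted (d.getD s []) (fun x => x) false)) transitions
  transitions.items

-- ===== PORT B =====
def build_transition_graph_py_alt (words : List (List Int)) : List (Int × List Int) :=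
  if words = [] then [] else
  let lengths : List Int := words.map (fun w => (w.length : Int))
  -- transitions = {length: [] for length in set(lengths)}
  let transitions : PySem.Dict Int (List Int) :=
    (PySem.Set.ofList lengths).foldl (fun d l => d.insert l []) PySem.Dict.empty
  -- for current, nxt in sorted(zip(lengths, lengths[1:])): transitions[current].append(nxt)
  let pairs := PySem.List.sorted2 (lengths.zip (PySem.List.slice lengths (some 1) none))
    (fun p => p.1) (fun p => p.2) false
  let transitions :=
    pairs.foldl (fun d p => d.modify p.1 [] (fun v => v ++ [p.2])) transitions
  transitions.items

-- ===== PRECONDITION & SPEC =====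
def Spec_build_transition_graph_py (words : List (List Int)) (out : List (Int × List Int)) : Prop := out = build_transition_graph_py_alt words
instance (words : List (List Int)) (out : List (Int × List Int)) : Decidable (Spec_build_transition_graph_py words out) := by unfold Spec_build_transition_graph_py; infer_instance

-- ===== CLAIM (what is proved, stated in full; the proofs are below) =====
def Claim_equal_build_transition_graph_py : Prop := ∀ (words : List (List Int)), Dom_build_transition_graph_py words → Spec_build_transition_graph_py words (build_transition_graph_py words)

-- ===== LEMMAS AND PROOFS =====

-- the lexicographic order on Int pairs that Python's tuple sort realises
def pvLexLe (a b : Int × Int) : Prop := a.1 < b.1 ∨ (a.1 = b.1 ∧ a.2 ≤ b.2)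

theorem pvLexLe_trans : ∀ {a b c : Int × Int}, pvLexLe a b → pvLexLe b c → pvLexLe a c := by
  rintro ⟨a1, a2⟩ ⟨b1, b2⟩ ⟨c1, c2⟩ (h | ⟨h, h2⟩) (g | ⟨g, g2⟩) <;> unfold pvLexLe <;> simp_all <;> omega

theorem pairwise_insertBy {α : Type} (R : α → α → Prop) (before : α → α → Bool)
    (htrans : ∀ {a b c}, R a b → R b c → R a c)
    (htrue : ∀ a b, before a b = true → R a b)
    (hfalse : ∀ a b, before a b = false → R b a)
    (x : α) (ys : List α) (h : ys.Pairwise R) :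
    (PySem.List.insertBy before x ys).Pairwise R := by
  induction ys with
  | nil => simp [PySem.List.insertBy]
  | cons y ys ih =>
    rcases List.pairwise_cons.mp h with ⟨hy, hys⟩
    by_cases hb : before x y = true
    · rw [show PySem.List.insertBy before x (y :: ys) = x :: y :: ys by
        simp [PySem.List.insertBy, hb]]
      refine List.pairwise_cons.mpr ⟨?_, h⟩
      intro z hz
      rcases List.mem_cons.mp hz with rfl | hz'
      · exact htrue _ _ hb
      · exact htrans (htrue _ _ hb) (hy _ hz')
    · rw [show PySem.List.insertBy before x (y :: ys) = y :: PySem.List.insertBy before x ys by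
        simp [PySem.List.insertBy, hb]]
      refine List.pairwise_cons.mpr ⟨?_, ih hys⟩
      intro z hz
      rcases (PySem.List.mem_insertBy before x z ys).mp hz with rfl | hz
      · exact hfalse _ _ (by simpa using hb)
      · exact hy _ hz

theorem pairwise_foldl_insertBy {α : Type} (R : α → α → Prop) (before : α → α → Bool)
    (htrans : ∀ {a b c}, R a b → R b c → R a c)
    (htrue : ∀ a b, before a b = true → R a b)
    (hfalse : ∀ a b, before a b = false → R b a)
    (xs acc : List α) (h : acc.Pairwise R) :
    (xs.foldl (fun acc x => PySem.List.insertBy before x acc) acc).Pairwise R := by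
  induction xs generalizing acc with
  | nil => exact h
  | cons x xs ih => exact ih _ (pairwise_insertBy R before htrans htrue hfalse x acc h)

theorem sorted2_pairwise_lex (P : List (Int × Int)) :
    (PySem.List.sorted2 P (fun p => p.1) (fun p => p.2) false).Pairwise pvLexLe := by
  unfold PySem.List.sorted2
  simp only [if_neg (by decide : ¬ (false = true))]
  refine pairwise_foldl_insertBy pvLexLe _ (fun {a b c} => pvLexLe_trans) ?_ ?_ P [] (by simp)
  · intro a b hb
    unfold pvLexLe
    simp only [Bool.or_eq_true, Bool.and_eq_true, decide_eq_true_eq, Bool.not_eq_true',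
      decide_eq_false_iff_not] at hb
    omega
  · intro a b hb
    unfold pvLexLe
    simp only [Bool.or_eq_false_iff, Bool.and_eq_false_iff, Bool.not_eq_false',
      decide_eq_true_eq, decide_eq_false_iff_not] at hb
    omega

-- sorted2 on pairs, filtered to one first component, projects to a sorted list of seconds
theorem filter_sorted2_map_snd (P : List (Int × Int)) (k : Int) :
    ((PySem.List.sorted2 P (fun p => p.1) (fun p => p.2) false).filter
        (fun p => p.1 == k)).map (fun p => p.2)
      = PySem.List.sorted ((P.filter (fun p => p.1 == k)).map (fun p => p.2)) (fun x => x) false := by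
  refine (PySem.List.sorted_id_eq_of_perm_of_pairwise _ _ ?_ ?_).symm
  · exact ((PySem.List.sorted2_perm P _ _ false).filter _).map _
  · rw [List.pairwise_map]
    refine (sorted2_pairwise_lex P).filter _ |>.imp_of_mem ?_
    intro a b ha hb hab
    have ha' := List.of_mem_filter ha
    have hb' := List.of_mem_filter hb
    simp only [beq_iff_eq] at ha' hb'
    rcases hab with h | ⟨_, h⟩ <;> omega

-- zip with the tail, element by element
theorem zip_tail_eq_map_range (xs : List Int) :
    xs.zip xs.tail = (List.range (xs.length - 1)).map (fun j => (xs.getD j 0, xs.getD (j+1) 0)) := by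
  induction xs with
  | nil => rfl
  | cons x xs ih =>
    cases xs with
    | nil => rfl
    | cons y ys =>
      have hlen : (x :: y :: ys : List Int).length - 1 = ys.length + 1 := by simp
      have ihl : (y :: ys : List Int).length - 1 = ys.length := by simp
      simp only [List.tail_cons] at ih ⊢
      rw [hlen, List.range_succ_eq_map, List.map_cons, List.map_map,
        List.zip_cons_cons, ih, ihl]
      simp [Function.comp, List.getD]

-- A's index loop over range(len-1) is the fold over zip lengths (tail lengths)
theorem rangeLoop_eq_zipFold (xs : List Int) (d : PySem.Dict Int (List Int)) :
    (PySem.List.pyRange 0 ((xs.length : Int) - 1) 1).foldl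
      (fun d i => d.modify (PySem.List.pyGetD xs i 0) []
        (fun v => v ++ [PySem.List.pyGetD xs (i + 1) 0])) d
    = (xs.zip xs.tail).foldl (fun d p => d.modify p.1 [] (fun v => v ++ [p.2])) d := by
  rw [PySem.List.pyRange_one, List.foldl_map]
  have h1 : ((xs.length : Int) - 1 - 0).toNat = xs.length - 1 := by omega
  rw [h1, zip_tail_eq_map_range, List.foldl_map]
  apply PySem.List.foldl_congr_mem
  intro acc j hj
  have hc : (0 : Int) + (j : Int) + 1 = ((j + 1 : Nat) : Int) := by push_cast; ring
  rw [hc, zero_add, PySem.List.pyGetD_natCast, PySem.List.pyGetD_natCast]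

-- the init fold keeps every getD (with default []) at []
theorem getD_init_fold (l : List Int) (d : PySem.Dict Int (List Int))
    (h : ∀ j, d.getD j ([] : List Int) = []) (k : Int) :
    (l.foldl (fun d x => d.insert x ([] : List Int)) d).getD k [] = [] := by
  induction l generalizing d with
  | nil => exact h k
  | cons x l ih =>
    simp only [List.foldl_cons]
    exact ih _ (fun j => by rw [PySem.Dict.getD_insert]; split <;> simp [h])

-- the sort loop: untouched keys keep their value …
theorem getD_sortLoop_not_mem (ks : List Int) (d : PySem.Dict Int (List Int)) (k : Int)
    (hk : k ∉ ks) :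
    (ks.foldl (fun d s => d.insert s (PySem.List.sorted (d.getD s []) (fun x => x) false)) d).getD k []
      = d.getD k [] := by
  induction ks generalizing d with
  | nil => rfl
  | cons s ks ih =>
    simp only [List.foldl_cons]
    rw [ih _ (by simp_all), PySem.Dict.getD_insert_of_ne _ _ _ (by simp_all : k ≠ s)]

-- … and each key, visited once, ends up sorted
theorem getD_sortLoop_mem (ks : List Int) (d : PySem.Dict Int (List Int)) (k : Int)
    (hnd : ks.Nodup) (hk : k ∈ ks) :
    (ks.foldl (fun d s => d.insert s (PySem.List.sorted (d.getD s []) (fun x => x) false)) d).getD k []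
      = PySem.List.sorted (d.getD k []) (fun x => x) false := by
  induction ks generalizing d with
  | nil => simp at hk
  | cons s ks ih =>
    simp only [List.foldl_cons]
    rcases List.mem_cons.mp hk with rfl | hk'
    · rw [getD_sortLoop_not_mem _ _ _ (List.nodup_cons.mp hnd).1,
        PySem.Dict.getD_insert_self]
    · rw [ih _ (List.nodup_cons.mp hnd).2 hk',
        PySem.Dict.getD_insert_of_ne _ _ _
          (by rintro rfl; exact (List.nodup_cons.mp hnd).1 hk')]

-- updating a set with members only is the identity
theorem set_update_of_subset (s : PySem.Set Int) (xs : List Int) (h : ∀ x ∈ xs, x ∈ s) :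
    PySem.Set.update s xs = s := by
  rw [PySem.Set.update_eq_append_filter]
  have hnil : List.filter (fun y => !(PySem.Set.contains s y)) (PySem.Set.ofList xs) = [] := by
    rw [List.filter_eq_nil_iff]
    intro a ha
    have : a ∈ s := h a ((PySem.Set.mem_ofList xs a).mp ha)
    simpa using this
  rw [hnil, List.append_nil]

-- the grouping fold touches only keys already present
theorem keys_modifyFold (l : List (Int × Int)) (d : PySem.Dict Int (List Int))
    (h : ∀ p ∈ l, p.1 ∈ d.keys) :
    (l.foldl (fun d p => d.modify p.1 [] (fun v => v ++ [p.2])) d).keys = d.keys := by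
  rw [PySem.Dict.keys_foldl_modify_key]
  apply set_update_of_subset
  intro x hx
  rcases List.mem_map.mp hx with ⟨p, hp, rfl⟩
  exact h p hp

theorem main_eq (words : List (List Int)) :
    build_transition_graph_py words = build_transition_graph_py_alt words := by
  by_cases hw : words = []
  · simp [build_transition_graph_py, build_transition_graph_py_alt, hw]
  · simp only [build_transition_graph_py, build_transition_graph_py_alt, if_neg hw,
      PySem.List.slice_from_one, rangeLoop_eq_zipFold]
    set L : List Int := words.map (fun w => (w.length : Int)) with hL
    set P : List (Int × Int) := L.zip L.tail with hP
    set d0 : PySem.Dict Int (List Int) :=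
      (PySem.Set.ofList L).foldl (fun d l => d.insert l []) PySem.Dict.empty with hd0
    have hd0keys : d0.keys = PySem.Set.ofList L := by
      rw [hd0, PySem.Dict.keys_foldl_insert]
      simp [PySem.Set.update_nil_left, PySem.Set.ofList_ofList]
    have hd0val : ∀ k, d0.getD k [] = [] := fun k =>
      getD_init_fold _ _ (fun j => by simp) k
    have hPfst : ∀ p ∈ P, p.1 ∈ PySem.Set.ofList L := by
      intro p hp
      exact (PySem.Set.mem_ofList L p.1).mpr (List.of_mem_zip hp).1
    set dA1 : PySem.Dict Int (List Int) :=
      P.foldl (fun d p => d.modify p.1 [] (fun v => v ++ [p.2])) d0 with hdA1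
    have hA1keys : dA1.keys = PySem.Set.ofList L := by
      rw [hdA1, keys_modifyFold _ _ (by rw [hd0keys]; exact hPfst), hd0keys]
    have hA1nodup : dA1.keys.Nodup := by rw [hA1keys]; exact PySem.Set.nodup_ofList L
    have hA1val : ∀ k, dA1.getD k [] = (P.filter (fun p => p.1 == k)).map (fun p => p.2) := by
      intro k
      rw [hdA1, PySem.Dict.getD_foldl_modify_append, hd0val]
      simp
    set dA2 : PySem.Dict Int (List Int) :=
      dA1.keys.foldl (fun d s => d.insert s (PySem.List.sorted (d.getD s []) (fun x => x) false)) dA1 with hdA2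
    have hA2keys : dA2.keys = PySem.Set.ofList L := by
      rw [hdA2, PySem.Dict.keys_foldl_insert,
        set_update_of_subset _ _ (fun x hx => hx), hA1keys]
    have hA2nodup : dA2.keys.Nodup := by rw [hA2keys]; exact PySem.Set.nodup_ofList L
    set SP : List (Int × Int) :=
      PySem.List.sorted2 P (fun p => p.1) (fun p => p.2) false with hSP
    set dB : PySem.Dict Int (List Int) :=
      SP.foldl (fun d p => d.modify p.1 [] (fun v => v ++ [p.2])) d0 with hdB
    have hSPfst : ∀ p ∈ SP, p.1 ∈ PySem.Set.ofList L := by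
      intro p hp
      exact hPfst p ((PySem.List.sorted2_perm P _ _ false).mem_iff.mp hp)
    have hBkeys : dB.keys = PySem.Set.ofList L := by
      rw [hdB, keys_modifyFold _ _ (by rw [hd0keys]; exact hSPfst), hd0keys]
    have hBnodup : dB.keys.Nodup := by rw [hBkeys]; exact PySem.Set.nodup_ofList L
    have hBval : ∀ k, dB.getD k [] = (SP.filter (fun p => p.1 == k)).map (fun p => p.2) := by
      intro k
      rw [hdB, PySem.Dict.getD_foldl_modify_append, hd0val]
      simp
    rw [PySem.Dict.items_eq_map_keys dA2 hA2nodup [], PySem.Dict.items_eq_map_keys dB hBnodup [],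
      hA2keys, hBkeys]
    apply List.map_congr_left
    intro k hk
    have hAv : dA2.getD k [] = PySem.List.sorted (dA1.getD k []) (fun x => x) false := by
      rw [hdA2]
      exact getD_sortLoop_mem _ _ _ hA1nodup (by rw [hA1keys]; exact hk)
    rw [hAv, hA1val, hBval, hSP, filter_sorted2_map_snd]

-- ===== VERDICT (by name: the statement is the Claim_ definition above) =====
theorem build_transition_graph_py_spec : Claim_equal_build_transition_graph_py := by
  intro words _
  exact main_eq words
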